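-- pv_equiv track=rewrite | github.com/bjpl/git_analysis | MySpanishApp/ai/intelligence/pronunciation_analyzer.py | _find_consonant_clusters
-- ===== SOURCE A (Python) =====
-- from typing import Dict, List, Tuple, Optional, Any
--
-- def _find_consonant_clusters(word: str) -> List[str]:
--     """Find consonant clusters that might be difficult"""
--     clusters = []
--     consonants = 'bcdfghjklmnpqrstvwxyz'
--
--     i = 0
--     while i < len(word) - 1:
--         current = word[i].lower()
--         next_char = word[i + 1].lower()
--
--         if current in consonants and next_char in consonants:
--             cluster = current + next_char
--             # Check for common difficult clusters
--             if cluster in ['pr', 'pl', 'br', 'bl', 'tr', 'dr', 'cr', 'cl', 'fr', 'fl', 'gr', 'gl']: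
--                 clusters.append(cluster)
--             i += 2
--         else:
--             i += 1
--
--     return clusters
-- ===== SOURCE B (Python) =====
-- def _find_consonant_clusters(word: str):
--     """Find consonant clusters that might be difficult (run-based two-pass rewrite)."""
--     consonants = 'bcdfghjklmnpqrstvwxyz'
--     difficult = ['pr', 'pl', 'br', 'bl', 'tr', 'dr', 'cr', 'cl', 'fr', 'fl', 'gr', 'gl']
--     # Pass 1: collect maximal runs of consonants from the lowercased word.
--     runs = []
--     cur = ''
--     for ch in word.lower():
--         if ch in consonants:
--             cur += ch
--         else:
--             if cur:
--                 runs.append(cur)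
--             cur = ''
--     if cur:
--         runs.append(cur)
--     # Pass 2: within each run, take non-overlapping adjacent pairs from its start.
--     clusters = []
--     for run in runs:
--         while len(run) >= 2:
--             pair = run[:2]
--             if pair in difficult:
--                 clusters.append(pair)
--             run = run[2:]
--     return clusters
-- ===== Notes on version B (the rewrite author's own statement) =====
-- stated objective: alternative
-- what changed: Replaces A's single variable-step while loop (index advancing by 1 or 2 with per-character lowercasing) by a two-pass design: one fold over the lowercased word collecting maximal consonant runs, then non-overlapping pair extraction from the start of each run.
import Mathlib
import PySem

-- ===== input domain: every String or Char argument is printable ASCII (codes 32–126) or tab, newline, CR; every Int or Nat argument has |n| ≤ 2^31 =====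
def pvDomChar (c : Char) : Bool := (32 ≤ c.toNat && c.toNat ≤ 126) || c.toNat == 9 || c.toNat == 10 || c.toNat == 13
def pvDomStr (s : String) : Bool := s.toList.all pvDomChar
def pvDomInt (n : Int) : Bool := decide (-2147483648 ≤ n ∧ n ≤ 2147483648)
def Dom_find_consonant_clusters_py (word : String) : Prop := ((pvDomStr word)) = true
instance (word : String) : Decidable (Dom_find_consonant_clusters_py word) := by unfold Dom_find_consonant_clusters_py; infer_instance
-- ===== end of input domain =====

-- B replaces A's variable-step index loop by two passes (collect maximal consonant
-- runs, then take non-overlapping pairs from each run's start); same return value.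

def pvConsonants : List Char := "bcdfghjklmnpqrstvwxyz".toList

def pvDifficult : List String :=
  ["pr", "pl", "br", "bl", "tr", "dr", "cr", "cl", "fr", "fl", "gr", "gl"]

-- ===== PORT A =====
-- the `while i < len(word) - 1` loop, step for step (i advances by 2 or by 1)
def pvALoop (ls : List Char) (i : Nat) : List String :=
  if h : i + 1 < ls.length then
    let current := PySem.Chars.lowerChar (ls[i]'(by omega))
    let next_char := PySem.Chars.lowerChar (ls[i + 1]'h)
    if current ∈ pvConsonants ∧ next_char ∈ pvConsonants then
      let cluster := String.mk [current, next_char]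
      (if cluster ∈ pvDifficult then [cluster] else []) ++ pvALoop ls (i + 2)
    else
      pvALoop ls (i + 1)
  else []
termination_by ls.length - i

def find_consonant_clusters_py (word : String) : List String :=
  pvALoop word.toList 0

-- ===== PORT B =====
-- `while len(run) >= 2: pair = run[:2]; …; run = run[2:]`
def pvBPairs (run : List Char) : List String :=
  match run with
  | a :: b :: rest =>
      let pair := String.mk [a, b]
      (if pair ∈ pvDifficult then [pair] else []) ++ pvBPairs rest
  | _ => []

-- body of the `for ch in word.lower()` run-collecting loop
def pvBStep (acc : List (List Char) × List Char) (ch : Char) : List (List Char) × List Char :=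
  if ch ∈ pvConsonants then (acc.1, acc.2 ++ [ch])
  else if acc.2 ≠ [] then (acc.1 ++ [acc.2], []) else (acc.1, [])

def find_consonant_clusters_py_alt (word : String) : List String :=
  let lw := (PySem.Str.lower word).toList
  let p := lw.foldl pvBStep ([], [])
  let runs := if p.2 ≠ [] then p.1 ++ [p.2] else p.1
  runs.flatMap pvBPairs

-- ===== PRECONDITION & SPEC =====
def Spec_find_consonant_clusters_py (word : String) (out : List String) : Prop := out = find_consonant_clusters_py_alt word
instance (word : String) (out : List String) : Decidable (Spec_find_consonant_clusters_py word out) := by unfold Spec_find_consonant_clusters_py; infer_instance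

-- ===== CLAIM (what is proved, stated in full; the proofs are below) =====
def Claim_equal_find_consonant_clusters_py : Prop := ∀ (word : String), Dom_find_consonant_clusters_py word → Spec_find_consonant_clusters_py word (find_consonant_clusters_py word)

-- ===== LEMMAS AND PROOFS =====

-- recursive form of the run-collecting fold
def pvRuns (cur : List Char) (ls : List Char) : List (List Char) :=
  match ls with
  | [] => if cur ≠ [] then [cur] else []
  | c :: r =>
      if c ∈ pvConsonants then pvRuns (cur ++ [c]) r
      else (if cur ≠ [] then [cur] else []) ++ pvRuns [] r

def pvF (ls : List Char) : List String := (pvRuns [] ls).flatMap pvBPairs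

theorem pvFoldl_bStep (ls : List Char) : ∀ (rs : List (List Char)) (cur : List Char),
    (let p := ls.foldl pvBStep (rs, cur);
     if p.2 ≠ [] then p.1 ++ [p.2] else p.1) = rs ++ pvRuns cur ls := by
  induction ls with
  | nil => intro rs cur; by_cases hcur : cur = [] <;> simp [pvRuns, hcur]
  | cons c r ih =>
      intro rs cur
      by_cases hc : c ∈ pvConsonants
      · simpa [pvBStep, pvRuns, hc] using ih rs (cur ++ [c])
      · by_cases hcur : cur = []
        · subst hcur; simpa [pvBStep, pvRuns, hc] using ih rs []
        · have h2 := ih (rs ++ [cur]) []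
          simp only [List.foldl_cons, pvBStep, pvRuns, hc, if_neg, if_false, hcur,
            ne_eq, not_false_eq_true, if_true, if_pos] at h2 ⊢
          rw [h2]; simp

theorem pvRuns_eq (ls : List Char) : ∀ (cur : List Char),
    pvRuns cur ls =
      (let t := ls.takeWhile (· ∈ pvConsonants)
       if cur ++ t = [] then [] else [cur ++ t]) ++ pvRuns [] (ls.dropWhile (· ∈ pvConsonants)) := by
  induction ls with
  | nil =>
      intro cur
      simp only [pvRuns, List.takeWhile_nil, List.dropWhile_nil, List.append_nil]
      split <;> simp_all [pvRuns]
  | cons c r ih =>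
      intro cur
      by_cases hc : c ∈ pvConsonants
      · simp only [pvRuns, List.takeWhile_cons, List.dropWhile_cons, hc, decide_true,
          if_pos, if_true]
        rw [ih (cur ++ [c])]
        simp
      · simp only [pvRuns, List.takeWhile_cons, List.dropWhile_cons, hc, decide_false,
          Bool.false_eq_true, if_false, List.append_nil]
        split <;> simp_all

theorem pvF_unfold (ls : List Char) :
    pvF ls = pvBPairs (ls.takeWhile (· ∈ pvConsonants)) ++ pvF (ls.dropWhile (· ∈ pvConsonants)) := by
  unfold pvF
  rw [pvRuns_eq ls []]
  simp only [List.nil_append, List.flatMap_append]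
  congr 1
  by_cases ht : ls.takeWhile (· ∈ pvConsonants) = []
  · simp [ht, pvBPairs]
  · simp [ht]

theorem pvF_cons_not (c : Char) (r : List Char) (hc : c ∉ pvConsonants) :
    pvF (c :: r) = pvF r := by
  unfold pvF
  simp [pvRuns, hc]

theorem pvF_cc (a b : Char) (r : List Char) (ha : a ∈ pvConsonants) (hb : b ∈ pvConsonants) :
    pvF (a :: b :: r) =
      (if String.mk [a, b] ∈ pvDifficult then [String.mk [a, b]] else []) ++ pvF r := by
  rw [pvF_unfold (a :: b :: r)]
  simp only [List.takeWhile_cons, List.dropWhile_cons, ha, hb, decide_true, if_true]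
  rw [pvBPairs]
  simp only [List.append_assoc]
  congr 1
  rw [← pvF_unfold]

theorem pvF_cn (a b : Char) (r : List Char) (ha : a ∈ pvConsonants) (hb : b ∉ pvConsonants) :
    pvF (a :: b :: r) = pvF (b :: r) := by
  rw [pvF_unfold (a :: b :: r)]
  simp only [List.takeWhile_cons, List.dropWhile_cons, ha, hb, decide_true, decide_false,
    Bool.false_eq_true, if_true, if_false]
  simp [pvBPairs]

theorem pvALoop_eq_pvF (ls : List Char) : ∀ (i : Nat),
    pvALoop ls i = pvF ((ls.map PySem.Chars.lowerChar).drop i) := by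
  intro i
  induction hn : ls.length - i using Nat.strong_induction_on generalizing i with
  | _ n ih =>
  rw [pvALoop]
  by_cases h : i + 1 < ls.length
  · have h0 : i < ls.length := by omega
    have h0' : i < (ls.map PySem.Chars.lowerChar).length := by simpa using h0
    have h1' : i + 1 < (ls.map PySem.Chars.lowerChar).length := by simpa using h
    have hd : (ls.map PySem.Chars.lowerChar).drop i =
        PySem.Chars.lowerChar (ls[i]'h0) :: PySem.Chars.lowerChar (ls[i + 1]'h) ::
          (ls.map PySem.Chars.lowerChar).drop (i + 2) := by
      rw [List.drop_eq_getElem_cons h0', List.drop_eq_getElem_cons h1']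
      simp
    rw [dif_pos h, hd]
    by_cases hc0 : PySem.Chars.lowerChar (ls[i]'h0) ∈ pvConsonants
    · by_cases hc1 : PySem.Chars.lowerChar (ls[i + 1]'h) ∈ pvConsonants
      · rw [pvF_cc _ _ _ hc0 hc1]
        simp only [hc0, hc1, and_self, if_true, if_pos]
        rw [ih (ls.length - (i + 2)) (by omega) (i + 2) rfl]
      · rw [pvF_cn _ _ _ hc0 hc1]
        simp only [hc0, hc1, and_false, if_false, Bool.false_eq_true]
        rw [ih (ls.length - (i + 1)) (by omega) (i + 1) rfl]
        rw [List.drop_eq_getElem_cons h1']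
        simp
    · rw [pvF_cons_not _ _ hc0]
      simp only [hc0, false_and, if_false, Bool.false_eq_true]
      rw [ih (ls.length - (i + 1)) (by omega) (i + 1) rfl]
      rw [List.drop_eq_getElem_cons h1']
      simp
  · rw [dif_neg h]
    rcases Nat.lt_or_ge i ls.length with hi | hi
    · have hi' : i < (ls.map PySem.Chars.lowerChar).length := by simpa using hi
      rw [List.drop_eq_getElem_cons hi']
      have h2 : (ls.map PySem.Chars.lowerChar).drop (i + 1) = [] := by
        apply List.drop_eq_nil_of_le; simp; omega
      rw [h2]
      by_cases hc : (ls.map PySem.Chars.lowerChar)[i]'hi' ∈ pvConsonants <;>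
        simp [pvF, pvRuns, pvBPairs, hc]
    · have h2 : (ls.map PySem.Chars.lowerChar).drop i = [] := by
        apply List.drop_eq_nil_of_le; simp; omega
      rw [h2]; simp [pvF, pvRuns, pvBPairs]

-- ===== VERDICT (by name: the statement is the Claim_ definition above) =====
theorem find_consonant_clusters_py_spec : Claim_equal_find_consonant_clusters_py := by
  intro word _
  unfold Spec_find_consonant_clusters_py find_consonant_clusters_py find_consonant_clusters_py_alt
  rw [pvALoop_eq_pvF]
  have h := pvFoldl_bStep ((PySem.Str.lower word).toList) [] []
  simp only [] at h
  simp only [List.drop_zero, h, List.nil_append]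
  rw [PySem.Str.toList_lower]
  rw [show PySem.Chars.lower word.toList = word.toList.map PySem.Chars.lowerChar from rfl]
  rfl
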